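-- pv_equiv track=rewrite | github.com/saad-zaib/hackforgev1 | core/mutations/cross_site_scripting_mutation.py | _get_filter_codes
-- ===== SOURCE A (Python) =====
-- from typing import Dict, List, Any
--
-- def _get_filter_codes(filter_names: List[str]) -> List[Dict]:
--     """Convert filter names to filter code objects"""
--     filter_map = {
--         'script_tag': {
--             'type': 'script_tag',
--             'description': 'Script_tag filtering',
--             'php_code': "$input = str_replace('s', '', $input);",
--             'python_code': "input = input.replace('s', '')",
--         },
--         'onerror': {
--             'type': 'onerror',
--             'description': 'Onerror filtering',
--             'php_code': "$input = str_replace('o', '', $input);",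
--             'python_code': "input = input.replace('o', '')",
--         },
--         'onclick': {
--             'type': 'onclick',
--             'description': 'Onclick filtering',
--             'php_code': "$input = str_replace('o', '', $input);",
--             'python_code': "input = input.replace('o', '')",
--         },
--         'javascript_protocol': {
--             'type': 'javascript_protocol',
--             'description': 'Javascript_protocol filtering',
--             'php_code': "$input = str_replace('j', '', $input);",
--             'python_code': "input = input.replace('j', '')",
--         },
--         'angle_brackets': {
--             'type': 'angle_brackets',
--             'description': 'Angle_brackets filtering',
--             'php_code': "$input = str_replace('a', '', $input);",
--             'python_code': "input = input.replace('a', '')",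
--         },
--         'quotes': {
--             'type': 'quotes',
--             'description': 'Quotes filtering',
--             'php_code': "$input = str_replace('q', '', $input);",
--             'python_code': "input = input.replace('q', '')",
--         }
--     }
--
--     return [filter_map[f] for f in filter_names if f in filter_map]
-- ===== SOURCE B (Python) =====
-- def _get_filter_codes(filter_names):
--     """Convert filter names to filter code objects, computing each dict from the
--     name itself instead of looking it up in a hard-coded table."""
--     valid = ('script_tag', 'onerror', 'onclick', 'javascript_protocol',
--              'angle_brackets', 'quotes')
--     result = []
--     for f in filter_names:
--         if f in valid:
--             c = f[:1]
--             result.append({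
--                 'type': f,
--                 'description': c.upper() + f[1:] + ' filtering',
--                 'php_code': "$input = str_replace('" + c + "', '', $input);",
--                 'python_code': "input = input.replace('" + c + "', '')",
--             })
--     return result
-- ===== Notes on version B (the rewrite author's own statement) =====
-- stated objective: simpler
-- what changed: B drops A's 30-line hard-coded dict table entirely and computes each filter dict from the name itself (capitalized description, first-letter replace snippets), keeping only the tuple of six valid names.
import Mathlib
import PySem

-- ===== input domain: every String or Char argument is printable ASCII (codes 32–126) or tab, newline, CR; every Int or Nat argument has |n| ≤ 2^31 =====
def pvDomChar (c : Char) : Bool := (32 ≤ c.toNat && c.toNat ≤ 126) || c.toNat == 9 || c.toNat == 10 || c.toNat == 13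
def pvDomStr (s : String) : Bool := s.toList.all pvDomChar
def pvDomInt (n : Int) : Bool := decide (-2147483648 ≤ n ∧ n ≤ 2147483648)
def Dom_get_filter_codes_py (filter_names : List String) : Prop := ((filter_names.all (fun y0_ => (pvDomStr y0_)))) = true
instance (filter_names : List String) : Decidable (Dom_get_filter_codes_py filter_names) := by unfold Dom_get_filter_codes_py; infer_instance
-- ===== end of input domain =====

-- B replaces A's hard-coded 6-entry lookup table by computing each filter dict from its name; objective: simpler.
-- Note: Python A returns the SAME dict object for repeated names where B builds fresh equal dicts; the equivalence is about values.

-- ===== PORT A =====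
-- the literal filter_map dict of A
def pvFilterMapA : PySem.Dict String (List (String × String)) :=
  PySem.Dict.ofList
    [ ("script_tag",
        [("type", "script_tag"), ("description", "Script_tag filtering"),
         ("php_code", "$input = str_replace('s', '', $input);"),
         ("python_code", "input = input.replace('s', '')")]),
      ("onerror",
        [("type", "onerror"), ("description", "Onerror filtering"),
         ("php_code", "$input = str_replace('o', '', $input);"),
         ("python_code", "input = input.replace('o', '')")]),
      ("onclick",
        [("type", "onclick"), ("description", "Onclick filtering"),
         ("php_code", "$input = str_replace('o', '', $input);"),
         ("python_code", "input = input.replace('o', '')")]),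
      ("javascript_protocol",
        [("type", "javascript_protocol"), ("description", "Javascript_protocol filtering"),
         ("php_code", "$input = str_replace('j', '', $input);"),
         ("python_code", "input = input.replace('j', '')")]),
      ("angle_brackets",
        [("type", "angle_brackets"), ("description", "Angle_brackets filtering"),
         ("php_code", "$input = str_replace('a', '', $input);"),
         ("python_code", "input = input.replace('a', '')")]),
      ("quotes",
        [("type", "quotes"), ("description", "Quotes filtering"),
         ("php_code", "$input = str_replace('q', '', $input);"),
         ("python_code", "input = input.replace('q', '')")]) ]

-- [filter_map[f] for f in filter_names if f in filter_map]: the guard 'f in filter_map'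
-- followed by the lookup filter_map[f] is exactly filterMap get? (get? = some ↔ membership).
def get_filter_codes_py (filter_names : List String) : List (List (String × String)) :=
  filter_names.filterMap (fun f => pvFilterMapA.get? f)

-- ===== PORT B =====
def pvValidNames : List String :=
  ["script_tag", "onerror", "onclick", "javascript_protocol", "angle_brackets", "quotes"]

-- one dict of B, computed from the name; Python string '+' is ported exactly on List Char via String.ofList
def pvMkFilter (f : String) : List (String × String) :=
  let cs := f.toList
  let c := cs.take 1                 -- f[:1]
  [ ("type", f),
    ("description", String.ofList (PySem.Chars.upper c ++ cs.drop 1 ++ " filtering".toList)),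
    ("php_code", String.ofList ("$input = str_replace('".toList ++ c ++ "', '', $input);".toList)),
    ("python_code", String.ofList ("input = input.replace('".toList ++ c ++ "', '')".toList)) ]

def get_filter_codes_py_alt (filter_names : List String) : List (List (String × String)) :=
  filter_names.filterMap (fun f => if pvValidNames.contains f then some (pvMkFilter f) else none)

-- ===== PRECONDITION & SPEC =====
def Spec_get_filter_codes_py (filter_names : List String) (out : List (List (String × String))) : Prop := out = get_filter_codes_py_alt filter_names
instance (filter_names : List String) (out : List (List (String × String))) : Decidable (Spec_get_filter_codes_py filter_names out) := by unfold Spec_get_filter_codes_py; infer_instance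

-- ===== CLAIM (what is proved, stated in full; the proofs are below) =====
def Claim_equal_get_filter_codes_py : Prop := ∀ (filter_names : List String), Dom_get_filter_codes_py filter_names → Spec_get_filter_codes_py filter_names (get_filter_codes_py filter_names)

-- ===== LEMMAS AND PROOFS =====

-- per-element agreement: A's lookup equals B's computed dict (guarded by the valid-name test)
theorem pv_elem_eq (f : String) :
    pvFilterMapA.get? f = (if pvValidNames.contains f then some (pvMkFilter f) else none) := by
  by_cases h1 : f = "script_tag"; · subst h1; decide
  by_cases h2 : f = "onerror"; · subst h2; decide
  by_cases h3 : f = "onclick"; · subst h3; decide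
  by_cases h4 : f = "javascript_protocol"; · subst h4; decide
  by_cases h5 : f = "angle_brackets"; · subst h5; decide
  by_cases h6 : f = "quotes"; · subst h6; decide
  have c : pvValidNames.contains f = false := by
    simp only [pvValidNames, List.contains_cons, List.contains_nil, Bool.or_false,
               Bool.or_eq_false_iff, beq_eq_false_iff_ne, ne_eq]
    exact ⟨h1, h2, h3, h4, h5, h6⟩
  rw [c]
  simp only [Bool.false_eq_true, if_false]
  have : pvFilterMapA = PySem.Dict.mk
      [ ("script_tag", [("type", "script_tag"), ("description", "Script_tag filtering"),
         ("php_code", "$input = str_replace('s', '', $input);"),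
         ("python_code", "input = input.replace('s', '')")]),
        ("onerror", [("type", "onerror"), ("description", "Onerror filtering"),
         ("php_code", "$input = str_replace('o', '', $input);"),
         ("python_code", "input = input.replace('o', '')")]),
        ("onclick", [("type", "onclick"), ("description", "Onclick filtering"),
         ("php_code", "$input = str_replace('o', '', $input);"),
         ("python_code", "input = input.replace('o', '')")]),
        ("javascript_protocol", [("type", "javascript_protocol"), ("description", "Javascript_protocol filtering"),
         ("php_code", "$input = str_replace('j', '', $input);"),
         ("python_code", "input = input.replace('j', '')")]),
        ("angle_brackets", [("type", "angle_brackets"), ("description", "Angle_brackets filtering"),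
         ("php_code", "$input = str_replace('a', '', $input);"),
         ("python_code", "input = input.replace('a', '')")]),
        ("quotes", [("type", "quotes"), ("description", "Quotes filtering"),
         ("php_code", "$input = str_replace('q', '', $input);"),
         ("python_code", "input = input.replace('q', '')")]) ] := by decide
  rw [this]
  simp [Ne.symm h1, Ne.symm h2, Ne.symm h3, Ne.symm h4, Ne.symm h5, Ne.symm h6,
        PySem.Dict.get?]

-- ===== VERDICT (by name: the statement is the Claim_ definition above) =====
theorem get_filter_codes_py_spec : Claim_equal_get_filter_codes_py := by
  intro filter_names _
  unfold Spec_get_filter_codes_py get_filter_codes_py get_filter_codes_py_alt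
  exact List.filterMap_congr (fun f _ => pv_elem_eq f)
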